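-- pv_equiv track=rewrite | github.com/cyrlemaire/Flood_Prediction_starting_kit | src/baseline_model01.py | compute_total_features
-- ===== SOURCE A (Python) =====
-- from typing import Union, Tuple, List, Optional, Any
--
-- def compute_total_features(
--                            dynamic_indices:List[int],
--                            histodept:int,
--                            histodept2:int,
--                            num_statics:int,
--                            use_derivative:bool)->int:
--     """ Compute the total number of features used in the model,
--     including the constructed derivative of the dynamic features.
--
--     Args:
--         dynamic_indices (): dynamic features indices
--         histodept (int): number of layers to average for the dynamic features
--         histodept2 (int): number of layers to average for the dynamic features (second part)
--         num_statics (int): number of static features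
--         use_derivative (int): compute the derivative of the dynamic features
--
--     Returns:
--         int : total number of features used in the model
--     """
--     total_features = num_statics
--     for _ in dynamic_indices:
--         if histodept > 0:
--             total_features += 1
--         if histodept2 > 0:
--             total_features += 1
--         if use_derivative & (histodept > 1):
--             total_features += 1
--         if use_derivative & (histodept2 > 1):
--             total_features += 1
--     return total_features
-- ===== SOURCE B (Python) =====
-- def compute_total_features(dynamic_indices, histodept, histodept2, num_statics, use_derivative):
--     per_index = (histodept > 0) + (histodept2 > 0)
--     if use_derivative:
--         per_index += (histodept > 1) + (histodept2 > 1)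
--     return num_statics + len(dynamic_indices) * per_index
-- ===== Notes on version B (the rewrite author's own statement) =====
-- stated objective: faster
-- what changed: Replaced the per-element increment loop by a closed form: num_statics plus len(dynamic_indices) times the per-index feature count.
import Mathlib
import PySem

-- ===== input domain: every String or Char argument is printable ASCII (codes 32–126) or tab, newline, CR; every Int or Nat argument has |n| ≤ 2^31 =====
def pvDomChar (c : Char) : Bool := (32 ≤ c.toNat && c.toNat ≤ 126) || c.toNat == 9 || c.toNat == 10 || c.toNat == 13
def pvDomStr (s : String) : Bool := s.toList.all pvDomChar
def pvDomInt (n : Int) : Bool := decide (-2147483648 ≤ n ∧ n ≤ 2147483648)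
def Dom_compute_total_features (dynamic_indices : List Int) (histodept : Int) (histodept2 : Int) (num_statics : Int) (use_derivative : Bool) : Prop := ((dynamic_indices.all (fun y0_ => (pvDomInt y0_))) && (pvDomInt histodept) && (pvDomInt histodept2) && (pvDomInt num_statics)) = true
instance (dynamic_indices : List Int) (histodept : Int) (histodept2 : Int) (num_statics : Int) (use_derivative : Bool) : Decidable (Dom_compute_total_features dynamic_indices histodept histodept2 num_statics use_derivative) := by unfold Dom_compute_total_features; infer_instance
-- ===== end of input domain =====

-- B replaces A's per-element increment loop by a closed form (count per index × list length); asymptotically faster.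

-- ===== PORT A =====
-- literal port of A's loop: fold over dynamic_indices, four conditional increments per element
def compute_total_features (dynamic_indices : List Int) (histodept : Int) (histodept2 : Int) (num_statics : Int) (use_derivative : Bool) : Int :=
  dynamic_indices.foldl
    (fun total_features _ =>
      let total_features := if histodept > 0 then total_features + 1 else total_features
      let total_features := if histodept2 > 0 then total_features + 1 else total_features
      let total_features := if use_derivative && decide (histodept > 1) then total_features + 1 else total_features
      let total_features := if use_derivative && decide (histodept2 > 1) then total_features + 1 else total_features
      total_features)
    num_statics

-- ===== PORT B =====
def compute_total_features_alt (dynamic_indices : List Int) (histodept : Int) (histodept2 : Int) (num_statics : Int) (use_derivative : Bool) : Int :=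
  let per_index : Int := (if histodept > 0 then 1 else 0) + (if histodept2 > 0 then 1 else 0)
  let per_index := if use_derivative then per_index + (if histodept > 1 then 1 else 0) + (if histodept2 > 1 then 1 else 0) else per_index
  num_statics + (dynamic_indices.length : Int) * per_index

-- ===== PRECONDITION & SPEC =====
def Spec_compute_total_features (dynamic_indices : List Int) (histodept : Int) (histodept2 : Int) (num_statics : Int) (use_derivative : Bool) (out : Int) : Prop := out = compute_total_features_alt dynamic_indices histodept histodept2 num_statics use_derivative
instance (dynamic_indices : List Int) (histodept : Int) (histodept2 : Int) (num_statics : Int) (use_derivative : Bool) (out : Int) : Decidable (Spec_compute_total_features dynamic_indices histodept histodept2 num_statics use_derivative out) := by unfold Spec_compute_total_features; infer_instance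

-- ===== CLAIM (what is proved, stated in full; the proofs are below) =====
def Claim_equal_compute_total_features : Prop := ∀ (dynamic_indices : List Int) (histodept : Int) (histodept2 : Int) (num_statics : Int) (use_derivative : Bool), Dom_compute_total_features dynamic_indices histodept histodept2 num_statics use_derivative → Spec_compute_total_features dynamic_indices histodept histodept2 num_statics use_derivative (compute_total_features dynamic_indices histodept histodept2 num_statics use_derivative)

-- ===== LEMMAS AND PROOFS =====

-- A's fold adds the same per-element amount each step
theorem compute_total_features_eq_alt (dynamic_indices : List Int) (histodept : Int) (histodept2 : Int) (num_statics : Int) (use_derivative : Bool) :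
    compute_total_features dynamic_indices histodept histodept2 num_statics use_derivative
      = compute_total_features_alt dynamic_indices histodept histodept2 num_statics use_derivative := by
  unfold compute_total_features compute_total_features_alt
  induction dynamic_indices generalizing num_statics with
  | nil => simp
  | cons x xs ih =>
    simp only [List.foldl_cons, List.length_cons]
    rw [ih]
    cases use_derivative <;> simp only [Bool.true_and, Bool.false_and, decide_eq_true_eq, if_true, if_false, Bool.false_eq_true] <;> split_ifs <;> push_cast <;> ring

-- ===== VERDICT (by name: the statement is the Claim_ definition above) =====
theorem compute_total_features_spec : Claim_equal_compute_total_features := by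
  intro dynamic_indices histodept histodept2 num_statics use_derivative _
  exact compute_total_features_eq_alt dynamic_indices histodept histodept2 num_statics use_derivative
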